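-- pv_equiv track=rewrite | github.com/jschalk/jaar | src/a01_road_logic/road.py | all_roadunits_between
-- ===== SOURCE A (Python) =====
-- class TagUnit(str):
--     """A string representation of a tree node. Nodes cannot contain RoadUnit bridge"""
--
--     def is_tag(self, bridge: str = None) -> bool:
--         return len(self) > 0 and self.contains_bridge(bridge)
--
--     def contains_bridge(self, bridge: str = None) -> bool:
--         return self.find(default_bridge_if_None(bridge)) == -1
--
-- class RoadUnit(str):
--     """A string representation of a tree path. TagUnits are seperated by road bridge"""
--
--     pass
--
-- def default_bridge_if_None(bridge: any = None) -> str: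
--     if bridge != bridge:  # float("nan")
--         bridge = None
--     return bridge if bridge is not None else ";"
--
-- def is_sub_road(ref_road: RoadUnit, sub_road: RoadUnit) -> bool:
--     ref_road = "" if ref_road is None else ref_road
--     return ref_road.find(sub_road) == 0
--
-- def get_all_road_tags(road: RoadUnit, bridge: str = None) -> list[TagUnit]:
--     return road.split(default_bridge_if_None(bridge))
--
-- def get_ancestor_roads(road: RoadUnit) -> list[RoadUnit]:
--     if road is None:
--         return []
--     tags = get_all_road_tags(road)
--     temp_road = tags.pop(0)
--
--     temp_roads = [temp_road]
--     if tags != []: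
--         while tags != []:
--             temp_road = create_road(temp_road, tags.pop(0))
--             temp_roads.append(temp_road)
--
--     x_roads = []
--     while temp_roads != []:
--         x_roads.append(temp_roads.pop(len(temp_roads) - 1))
--     return x_roads
--
-- def all_roadunits_between(src_road, dst_road) -> list[RoadUnit]:
--     x_list = []
--     anc_roads = get_ancestor_roads(dst_road)
--     while anc_roads != []:
--         anc_road = anc_roads.pop()
--         if is_sub_road(anc_road, src_road):
--             x_list.append(anc_road)
--     return x_list
--
-- class bridge_in_tag_Exception(Exception):
--     pass
--
-- def create_road(
--     parent_road: RoadUnit, terminus_tag: TagUnit = None, bridge: str = None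
-- ) -> RoadUnit:
--
--     if terminus_tag is None:
--         return RoadUnit(parent_road)
--     x_bridge = default_bridge_if_None(bridge)
--     terminus_tag = TagUnit(terminus_tag)
--     if terminus_tag.is_tag(x_bridge) is False:
--         raise bridge_in_tag_Exception(f"bridge '{x_bridge}' is in {terminus_tag}")
--
--     return RoadUnit(
--         terminus_tag
--         if parent_road in {"", None}
--         else f"{parent_road}{x_bridge}{terminus_tag}"
--     )
-- ===== SOURCE B (Python) =====
-- class bridge_in_tag_Exception(Exception):
--     pass
--
--
-- def all_roadunits_between(src_road, dst_road):
--     if dst_road is None: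
--         return []
--     tags = dst_road.split(";")
--     cur = tags[0]
--     prefixes = [cur]
--     for t in tags[1:]:
--         if t == "":
--             raise bridge_in_tag_Exception(f"bridge ';' is in {t}")
--         cur = t if cur == "" else f"{cur};{t}"
--         prefixes.append(cur)
--     # prefixes are nested, so `p.find(src_road) == 0` is monotone along the list:
--     # return everything from the first matching prefix onward.
--     for i, p in enumerate(prefixes):
--         if p.find(src_road) == 0:
--             return prefixes[i:]
--     return []
-- ===== Notes on version B (the rewrite author's own statement) =====
-- stated objective: simpler
-- what changed: B splits once and accumulates the nested prefix roads forward (raising on an empty later component like A's tag validation), then returns the suffix from the first prefix that starts with src_road (the test is monotone on nested prefixes), replacing A's create_road helper chain with its two pop-loop list reversals and per-element filtering.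
import Mathlib
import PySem

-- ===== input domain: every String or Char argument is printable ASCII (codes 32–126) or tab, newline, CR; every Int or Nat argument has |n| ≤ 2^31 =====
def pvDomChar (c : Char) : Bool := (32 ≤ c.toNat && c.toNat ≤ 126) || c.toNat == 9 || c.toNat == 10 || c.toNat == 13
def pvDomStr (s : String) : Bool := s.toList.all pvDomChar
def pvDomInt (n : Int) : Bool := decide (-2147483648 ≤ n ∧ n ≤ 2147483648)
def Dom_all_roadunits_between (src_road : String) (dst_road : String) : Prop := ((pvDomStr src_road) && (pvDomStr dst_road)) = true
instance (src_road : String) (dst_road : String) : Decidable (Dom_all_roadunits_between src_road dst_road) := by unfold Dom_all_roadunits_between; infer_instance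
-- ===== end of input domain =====

-- B builds the ancestor prefixes forward (validating components as A does) and returns the
-- suffix from the first prefix that starts with src_road (prefixes are nested, so the test is
-- monotone), instead of A's create_road helper chain with two pop-loop reversals and a
-- per-element filter. Objective: simpler.

-- ===== PORT A =====
-- roads are handled as List Char internally (Python str concatenation = List.append),
-- mapped back to String at the end.

-- TagUnit.is_tag with the default bridge ";" : len > 0 and find(";") == -1
def pvIsTag (t : List Char) : Bool := decide (t.length > 0) && (PySem.Chars.find t [';'] == -1)

-- create_road(parent, terminus) with default bridge; none = bridge_in_tag_Exception
def pvCreateRoad (parent t : List Char) : Option (List Char) :=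
  if pvIsTag t = false then none
  else some (if parent = [] then t else parent ++ ';' :: t)

-- the `while tags != []` loop of get_ancestor_roads (tags popped from the front)
def pvAncLoop (temp : List Char) (tags acc : List (List Char)) : Option (List (List Char)) :=
  match tags with
  | [] => some acc
  | t :: ts =>
    match pvCreateRoad temp t with
    | none => none
    | some r => pvAncLoop r ts (acc ++ [r])

-- the `while temp_roads != []` loop: pop the LAST element, append it to acc
def pvPopRevLoop (l acc : List (List Char)) : List (List Char) :=
  if h : l = [] then acc
  else pvPopRevLoop l.dropLast (acc ++ [l.getLast h])
termination_by l.length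
decreasing_by have := List.length_pos_iff.mpr h; simp [List.length_dropLast]; omega

-- get_ancestor_roads; none = the exception propagating out of create_road
def pvGetAncestorRoads (road : List Char) : Option (List (List Char)) :=
  match PySem.Chars.splitOn road [';'] with
  | [] => some []   -- unreachable: str.split never returns []
  | t0 :: ts =>
    match pvAncLoop t0 ts [t0] with
    | none => none
    | some temp_roads => some (pvPopRevLoop temp_roads [])

-- is_sub_road(ref, sub) for a non-None ref
def pvIsSubRoad (ref sub : List Char) : Bool := PySem.Chars.find ref sub == 0

-- the `while anc_roads != []` loop of all_roadunits_between: pop LAST, filter, append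
def pvFilterLoop (src : List Char) (anc acc : List (List Char)) : List (List Char) :=
  if h : anc = [] then acc
  else
    let r := anc.getLast h
    pvFilterLoop src anc.dropLast (if pvIsSubRoad r src then acc ++ [r] else acc)
termination_by anc.length
decreasing_by have := List.length_pos_iff.mpr h; simp [List.length_dropLast]; omega

def all_roadunits_between (src_road : String) (dst_road : String) : List String :=
  match pvGetAncestorRoads dst_road.toList with
  | none => []   -- unreachable under Pre_: create_road raised
  | some anc_roads => (pvFilterLoop src_road.toList anc_roads []).map String.ofList

-- ===== PORT B =====
-- the prefix-building loop: raise on an empty component, else cur = t if cur == "" else f"{cur};{t}";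
-- none = the bridge_in_tag_Exception Source B raises
def pvPrefLoop (cur : List Char) (tags : List (List Char)) : Option (List (List Char)) :=
  match tags with
  | [] => some []
  | t :: ts =>
    if t = [] then none
    else
      let nxt := if cur = [] then t else cur ++ ';' :: t
      match pvPrefLoop nxt ts with
      | none => none
      | some rest => some (nxt :: rest)

-- the enumerate loop: first prefix with p.find(src) == 0, together with everything after it
def pvFirstMatch (src : List Char) (prefixes : List (List Char)) : List (List Char) :=
  match prefixes with
  | [] => []
  | p :: ps => if PySem.Chars.find p src == 0 then p :: ps else pvFirstMatch src ps

def all_roadunits_between_alt (src_road : String) (dst_road : String) : List String :=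
  match PySem.Chars.splitOn dst_road.toList [';'] with
  | [] => []   -- unreachable: str.split never returns []
  | t0 :: ts =>
    match pvPrefLoop t0 ts with
    | none => []   -- unreachable under Pre_: Source B raised
    | some rest => (pvFirstMatch src_road.toList (t0 :: rest)).map String.ofList

-- ===== PRECONDITION & SPEC =====
-- Pre_ excludes exactly the inputs where A raises bridge_in_tag_Exception: a dst_road with an
-- empty component after the first (";;" inside, or a trailing ";"); split pieces never contain
-- the bridge, so the find-part of the tag test excludes nothing further. B raises there too.
def Pre_all_roadunits_between (_src_road : String) (dst_road : String) : Prop :=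
  ((PySem.Chars.splitOn dst_road.toList [';']).tail.all
    (fun t => decide (t.length > 0) && (PySem.Chars.find t [';'] == -1))) = true
instance (src_road : String) (dst_road : String) : Decidable (Pre_all_roadunits_between src_road dst_road) := by
  unfold Pre_all_roadunits_between; infer_instance

def pvWitness_all_roadunits_between : String × String := ("a", "a;b;c")

def Spec_all_roadunits_between (src_road : String) (dst_road : String) (out : List String) : Prop := out = all_roadunits_between_alt src_road dst_road
instance (src_road : String) (dst_road : String) (out : List String) : Decidable (Spec_all_roadunits_between src_road dst_road out) := by unfold Spec_all_roadunits_between; infer_instance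

-- ===== CLAIM (what is proved, stated in full; the proofs are below) =====
def Claim_equal_all_roadunits_between : Prop := ∀ (src_road : String) (dst_road : String), Dom_all_roadunits_between src_road dst_road → Pre_all_roadunits_between src_road dst_road → Spec_all_roadunits_between src_road dst_road (all_roadunits_between src_road dst_road)

-- ===== LEMMAS AND PROOFS =====

-- proof helper: the pure value pvPrefLoop computes when no component is empty
def pvPrefPure (cur : List Char) (tags : List (List Char)) : List (List Char) :=
  match tags with
  | [] => []
  | t :: ts =>
    let nxt := if cur = [] then t else cur ++ ';' :: t
    nxt :: pvPrefPure nxt ts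

theorem prefLoop_some (ts : List (List Char)) (cur : List Char)
    (h : ∀ t ∈ ts, t ≠ []) : pvPrefLoop cur ts = some (pvPrefPure cur ts) := by
  induction ts generalizing cur with
  | nil => simp [pvPrefLoop, pvPrefPure]
  | cons t ts ih =>
    have ht : t ≠ [] := h t (by simp)
    rw [pvPrefLoop, pvPrefPure]
    simp [ht, ih _ (fun u hu => h u (by simp [hu]))]

theorem popRevLoop_eq (l acc : List (List Char)) : pvPopRevLoop l acc = acc ++ l.reverse := by
  induction l using List.reverseRecOn generalizing acc with
  | nil => rw [pvPopRevLoop]; simp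
  | append_singleton xs x ih =>
    rw [pvPopRevLoop]
    simp [ih]

theorem filterLoop_eq (src : List Char) (anc acc : List (List Char)) :
    pvFilterLoop src anc acc = acc ++ anc.reverse.filter (fun r => pvIsSubRoad r src) := by
  induction anc using List.reverseRecOn generalizing acc with
  | nil => rw [pvFilterLoop]; simp
  | append_singleton xs x ih =>
    rw [pvFilterLoop]
    simp only [List.reverse_append, List.reverse_singleton, List.singleton_append,
      List.filter_cons]
    by_cases hx : pvIsSubRoad x src
    · simp [hx, ih]
    · simp [hx, ih]

theorem ancLoop_eq (ts : List (List Char)) (cur : List Char) (acc : List (List Char))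
    (h : ∀ t ∈ ts, (decide (t.length > 0) && (PySem.Chars.find t [';'] == -1)) = true) :
    pvAncLoop cur ts acc = some (acc ++ pvPrefPure cur ts) := by
  induction ts generalizing cur acc with
  | nil => simp [pvAncLoop, pvPrefPure]
  | cons t ts ih =>
    have ht : pvIsTag t = true := by simpa [pvIsTag] using h t (by simp)
    rw [pvAncLoop, pvPrefPure]
    simp only [pvCreateRoad, ht, Bool.true_eq_false, if_neg (by simp : ¬False)]
    show pvAncLoop _ ts (acc ++ [_]) = _
    rw [ih _ _ (fun u hu => h u (by simp [hu]))]
    simp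

theorem pairwise_prefPure (ts : List (List Char)) (cur : List Char) :
    (cur :: pvPrefPure cur ts).Pairwise (· <+: ·) := by
  induction ts generalizing cur with
  | nil => simp [pvPrefPure]
  | cons t ts ih =>
    show (cur :: (if cur = [] then t else cur ++ ';' :: t) :: _).Pairwise _
    have hcn : cur <+: (if cur = [] then t else cur ++ ';' :: t) := by
      by_cases hc : cur = []
      · simp [hc]
      · simp [hc]
    have htail := ih (if cur = [] then t else cur ++ ';' :: t)
    refine List.pairwise_cons.mpr ⟨?_, htail⟩
    intro q hq
    rcases List.mem_cons.mp hq with hq' | hq'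
    · exact hq' ▸ hcn
    · exact hcn.trans ((List.pairwise_cons.mp htail).1 q hq')

theorem find_eq_zero_iff (p src : List Char) :
    (PySem.Chars.find p src == 0) = true ↔ src <+: p := by
  rw [beq_iff_eq]
  constructor
  · intro h
    have h0 : 0 ≤ PySem.Chars.find p src := by rw [h]
    have hs := (PySem.Chars.find_spec h0).1
    rw [h] at hs
    simpa using hs
  · intro h
    have h0 : 0 ≤ PySem.Chars.find p src :=
      (PySem.Chars.find_nonneg_iff p src).mpr h.isInfix
    obtain ⟨h1, h2⟩ := PySem.Chars.find_spec h0
    by_contra hne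
    have hpos : 0 < (PySem.Chars.find p src).toNat := by omega
    exact h2 0 hpos (by simpa using h)

theorem firstMatch_eq_filter (src : List Char) (l : List (List Char))
    (hl : l.Pairwise (· <+: ·)) :
    l.filter (fun r => pvIsSubRoad r src) = pvFirstMatch src l := by
  induction l with
  | nil => simp [pvFirstMatch]
  | cons p ps ih =>
    obtain ⟨hp, hps⟩ := List.pairwise_cons.mp hl
    rw [pvFirstMatch, List.filter_cons]
    by_cases hm : (PySem.Chars.find p src == 0) = true
    · simp only [pvIsSubRoad, hm, if_true]
      congr 1
      apply List.filter_eq_self.mpr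
      intro q hq
      have : src <+: q := ((find_eq_zero_iff p src).mp hm).trans (hp q hq)
      simpa [pvIsSubRoad] using (find_eq_zero_iff q src).mpr this
    · simp only [pvIsSubRoad, hm]
      exact ih hps

-- ===== VERDICT (by name: the statement is the Claim_ definition above) =====
theorem all_roadunits_between_spec : Claim_equal_all_roadunits_between := by
  intro src dst _ hpre
  unfold Pre_all_roadunits_between at hpre
  simp only [Spec_all_roadunits_between, all_roadunits_between, all_roadunits_between_alt,
    pvGetAncestorRoads]
  cases hsp : PySem.Chars.splitOn dst.toList [';'] with
  | nil => simp [pvFilterLoop]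
  | cons t0 ts =>
    rw [hsp] at hpre
    have h : ∀ t ∈ ts, (decide (t.length > 0) && (PySem.Chars.find t [';'] == -1)) = true := by
      simpa [List.all_eq_true] using hpre
    have hne : ∀ t ∈ ts, t ≠ [] := by
      intro t ht
      have := h t ht
      intro he; simp [he] at this
    dsimp only
    rw [ancLoop_eq ts t0 [t0] h, prefLoop_some ts t0 hne]
    simp only [popRevLoop_eq, filterLoop_eq, List.nil_append, List.reverse_reverse,
      List.singleton_append]
    rw [firstMatch_eq_filter src.toList _ (pairwise_prefPure ts t0)]
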